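-- pv_equiv track=rewrite | github.com/Voyaga/proposal60 | proposal_builder.py | build_fallback_proposal
-- ===== SOURCE A (Python) =====
-- def build_fallback_proposal(data: dict) -> str:
--     """Deterministic fallback proposal (no AI)."""
--
--     client = data.get("client_name", "Client").strip()
--     service = data.get("service_type", "the requested work").strip()
--     scope = data.get("scope", "").strip()
--     price = data.get("price", "").strip()
--     timeframe = data.get("timeframe", "").strip()
--     business = data.get("your_business", "").strip()
--
--     lines = []
--
--     # ---- Header ----
--     lines.append(f"Proposal for: {client}")
--     lines.append("")
--
--     # ---- Overview ----
--     lines.append("1. Overview")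
--     if business:
--         lines.append(
--             f"This proposal outlines the scope of works for {service} to be carried out by {business}. "
--             "The work will be completed in accordance with standard trade practices and applicable requirements."
--         )
--     else:
--         lines.append(
--             f"This proposal outlines the scope of works for {service}. "
--             "The work will be completed in accordance with standard trade practices and applicable requirements."
--         )
--     lines.append("")
--
--     # ---- Scope of Work ----
--     lines.append("2. Scope of Work")
--     if scope:
--         for line in scope.splitlines():
--             clean = line.lstrip("- ").strip()
--             if clean:
--                 lines.append(f"- {clean}")
--     else:
--         lines.append("- Details to be confirmed")
--     lines.append("")
--
--     # ---- Optional Timeframe ----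
--     section_index = 3
--     if timeframe:
--         lines.append(f"{section_index}. Timeframe")
--         lines.append(timeframe)
--         lines.append("")
--         section_index += 1
--
--     # ---- Pricing ----
--     lines.append(f"{section_index}. Pricing")
--     if price:
--         lines.append(price)
--     else:
--         lines.append("Pricing to be confirmed.")
--     lines.append("")
--     section_index += 1
--
--     # ---- Acceptance ----
--     lines.append(f"{section_index}. Acceptance / Next Steps")
--     lines.append(
--         "Please review the details above and contact us by phone or email "
--         "to confirm acceptance or discuss any questions. If you have any modifications please feel free to contact us"
--     )
--     lines.append("")
--     lines.append("Kind regards,")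
--     if business:
--         lines.append(business)
--
--     return "\n".join(lines)
-- ===== SOURCE B (Python) =====
-- def build_fallback_proposal(data: dict) -> str:
--     """Deterministic fallback proposal (no AI) — assembled from section blocks."""
--
--     client = data.get("client_name", "Client").strip()
--     service = data.get("service_type", "the requested work").strip()
--     scope = data.get("scope", "").strip()
--     price = data.get("price", "").strip()
--     timeframe = data.get("timeframe", "").strip()
--     business = data.get("your_business", "").strip()
--
--     by = f" to be carried out by {business}" if business else ""
--     overview_body = [
--         f"This proposal outlines the scope of works for {service}{by}. "
--         "The work will be completed in accordance with standard trade practices and applicable requirements."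
--     ]
--
--     scope_body = ([f"- {item}" for item in
--                    (line.lstrip("- ").strip() for line in scope.splitlines())
--                    if item]
--                   if scope else ["- Details to be confirmed"])
--
--     sections = [("Overview", overview_body), ("Scope of Work", scope_body)]
--     if timeframe:
--         sections.append(("Timeframe", [timeframe]))
--     sections.append(("Pricing", [price if price else "Pricing to be confirmed."]))
--
--     lines = [f"Proposal for: {client}", ""]
--     for number, (title, body) in enumerate(sections, start=1):
--         lines.append(f"{number}. {title}")
--         lines.extend(body)
--         lines.append("")
--
--     lines.append(f"{len(sections) + 1}. Acceptance / Next Steps")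
--     lines.append(
--         "Please review the details above and contact us by phone or email "
--         "to confirm acceptance or discuss any questions. If you have any modifications please feel free to contact us"
--     )
--     lines.append("")
--     lines.append("Kind regards,")
--     if business:
--         lines.append(business)
--
--     return "\n".join(lines)
-- ===== Notes on version B (the rewrite author's own statement) =====
-- stated objective: alternative
-- what changed: B assembles the numbered sections as a list of (title, body-lines) blocks (Timeframe conditionally included) and numbers them by enumeration, instead of A's single sequential line-append list with a hand-maintained running section counter; the scope cleaning becomes a comprehension instead of an append loop.
import Mathlib
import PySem

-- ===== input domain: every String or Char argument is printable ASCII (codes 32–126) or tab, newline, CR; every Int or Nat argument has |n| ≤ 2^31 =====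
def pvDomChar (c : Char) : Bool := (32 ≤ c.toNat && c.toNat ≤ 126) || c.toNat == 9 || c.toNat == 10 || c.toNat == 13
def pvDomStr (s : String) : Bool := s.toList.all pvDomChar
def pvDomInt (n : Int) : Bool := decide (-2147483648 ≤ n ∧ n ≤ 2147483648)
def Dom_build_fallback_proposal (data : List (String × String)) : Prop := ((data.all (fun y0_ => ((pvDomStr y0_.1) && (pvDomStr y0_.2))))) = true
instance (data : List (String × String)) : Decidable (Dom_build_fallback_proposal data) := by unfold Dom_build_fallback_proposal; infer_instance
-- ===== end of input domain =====

-- B assembles the proposal from a list of (title, body) section blocks numbered by enumeration,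
-- instead of A's single sequential append list with a running section counter (objective: alternative decomposition).

-- hand port of s.lstrip("- "): drop leading '-' and ' ' characters; exact on all strings
def pvLstripDashSpace (s : String) : String :=
  String.ofList (s.toList.dropWhile (fun c => c = '-' || c = ' '))

-- ===== PORT A =====
def build_fallback_proposal (data : List (String × String)) : String :=
  let d := PySem.Dict.mk data
  let client := PySem.Str.strip (d.getD "client_name" "Client")
  let service := PySem.Str.strip (d.getD "service_type" "the requested work")
  let scope := PySem.Str.strip (d.getD "scope" "")
  let price := PySem.Str.strip (d.getD "price" "")
  let timeframe := PySem.Str.strip (d.getD "timeframe" "")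
  let business := PySem.Str.strip (d.getD "your_business" "")
  let lines : List String := []
  -- Header
  let lines := lines ++ ["Proposal for: " ++ client]
  let lines := lines ++ [""]
  -- Overview
  let lines := lines ++ ["1. Overview"]
  let lines := lines ++
    [if business ≠ "" then
      "This proposal outlines the scope of works for " ++ service ++ " to be carried out by " ++ business ++ ". " ++
      "The work will be completed in accordance with standard trade practices and applicable requirements."
    else
      "This proposal outlines the scope of works for " ++ service ++ ". " ++
      "The work will be completed in accordance with standard trade practices and applicable requirements."]
  let lines := lines ++ [""]
  -- Scope of Work
  let lines := lines ++ ["2. Scope of Work"]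
  let lines :=
    if scope ≠ "" then
      (PySem.Str.splitlines scope).foldl (fun acc line =>
        let clean := PySem.Str.strip (pvLstripDashSpace line)
        if clean ≠ "" then acc ++ ["- " ++ clean] else acc) lines
    else
      lines ++ ["- Details to be confirmed"]
  let lines := lines ++ [""]
  -- Optional Timeframe
  let sectionIndex : Int := 3
  let lines :=
    if timeframe ≠ "" then
      lines ++ [PySem.Int.toStr sectionIndex ++ ". Timeframe", timeframe, ""]
    else lines
  let sectionIndex := if timeframe ≠ "" then sectionIndex + 1 else sectionIndex
  -- Pricing
  let lines := lines ++ [PySem.Int.toStr sectionIndex ++ ". Pricing"]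
  let lines := lines ++ [if price ≠ "" then price else "Pricing to be confirmed."]
  let lines := lines ++ [""]
  let sectionIndex := sectionIndex + 1
  -- Acceptance
  let lines := lines ++ [PySem.Int.toStr sectionIndex ++ ". Acceptance / Next Steps"]
  let lines := lines ++
    ["Please review the details above and contact us by phone or email " ++
     "to confirm acceptance or discuss any questions. If you have any modifications please feel free to contact us"]
  let lines := lines ++ [""]
  let lines := lines ++ ["Kind regards,"]
  let lines := if business ≠ "" then lines ++ [business] else lines
  PySem.Str.join "\n" lines

-- ===== PORT B =====
def build_fallback_proposal_alt (data : List (String × String)) : String :=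
  let d := PySem.Dict.mk data
  let client := PySem.Str.strip (d.getD "client_name" "Client")
  let service := PySem.Str.strip (d.getD "service_type" "the requested work")
  let scope := PySem.Str.strip (d.getD "scope" "")
  let price := PySem.Str.strip (d.getD "price" "")
  let timeframe := PySem.Str.strip (d.getD "timeframe" "")
  let business := PySem.Str.strip (d.getD "your_business" "")
  let by_ := if business ≠ "" then " to be carried out by " ++ business else ""
  let overviewBody : List String :=
    ["This proposal outlines the scope of works for " ++ service ++ by_ ++ ". " ++
     "The work will be completed in accordance with standard trade practices and applicable requirements."]
  let scopeBody : List String :=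
    if scope ≠ "" then
      (((PySem.Str.splitlines scope).map
          (fun line => PySem.Str.strip (pvLstripDashSpace line))).filter
        (fun item => item ≠ "")).map (fun item => "- " ++ item)
    else
      ["- Details to be confirmed"]
  let sections : List (String × List String) := [("Overview", overviewBody), ("Scope of Work", scopeBody)]
  let sections := if timeframe ≠ "" then sections ++ [("Timeframe", [timeframe])] else sections
  let sections := sections ++ [("Pricing", [if price ≠ "" then price else "Pricing to be confirmed."])]
  let lines : List String := ["Proposal for: " ++ client, ""]
  let lines := (PySem.List.enumerate sections 1).foldl (fun acc p =>
    (acc ++ [PySem.Int.toStr p.1 ++ ". " ++ p.2.1]) ++ p.2.2 ++ [""]) lines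
  let lines := lines ++ [PySem.Int.toStr ((sections.length : Int) + 1) ++ ". Acceptance / Next Steps"]
  let lines := lines ++
    ["Please review the details above and contact us by phone or email " ++
     "to confirm acceptance or discuss any questions. If you have any modifications please feel free to contact us"]
  let lines := lines ++ [""]
  let lines := lines ++ ["Kind regards,"]
  let lines := if business ≠ "" then lines ++ [business] else lines
  PySem.Str.join "\n" lines

-- ===== PRECONDITION & SPEC =====
def Spec_build_fallback_proposal (data : List (String × String)) (out : String) : Prop := out = build_fallback_proposal_alt data
instance (data : List (String × String)) (out : String) : Decidable (Spec_build_fallback_proposal data out) := by unfold Spec_build_fallback_proposal; infer_instance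

-- ===== CLAIM (what is proved, stated in full; the proofs are below) =====
def Claim_equal_build_fallback_proposal : Prop := ∀ (data : List (String × String)), Dom_build_fallback_proposal data → Spec_build_fallback_proposal data (build_fallback_proposal data)

-- ===== LEMMAS AND PROOFS =====

theorem pv_toStr_one : PySem.Int.toStr 1 = "1" := rfl
theorem pv_toStr_two : PySem.Int.toStr 2 = "2" := rfl
theorem pv_toStr_three : PySem.Int.toStr 3 = "3" := rfl
theorem pv_toStr_four : PySem.Int.toStr 4 = "4" := rfl
theorem pv_toStr_five : PySem.Int.toStr 5 = "5" := rfl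

set_option maxHeartbeats 1000000 in
theorem core (client service scope price timeframe business : String) :
  (let lines : List String := []
   let lines := lines ++ ["Proposal for: " ++ client]
   let lines := lines ++ [""]
   let lines := lines ++ ["1. Overview"]
   let lines := lines ++
    [if business ≠ "" then
      "This proposal outlines the scope of works for " ++ service ++ " to be carried out by " ++ business ++ ". " ++
      "The work will be completed in accordance with standard trade practices and applicable requirements."
    else
      "This proposal outlines the scope of works for " ++ service ++ ". " ++
      "The work will be completed in accordance with standard trade practices and applicable requirements."]
   let lines := lines ++ [""]
   let lines := lines ++ ["2. Scope of Work"]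
   let lines :=
    if scope ≠ "" then
      (PySem.Str.splitlines scope).foldl (fun acc line =>
        let clean := PySem.Str.strip (pvLstripDashSpace line)
        if clean ≠ "" then acc ++ ["- " ++ clean] else acc) lines
    else
      lines ++ ["- Details to be confirmed"]
   let lines := lines ++ [""]
   let sectionIndex : Int := 3
   let lines :=
    if timeframe ≠ "" then
      lines ++ [PySem.Int.toStr sectionIndex ++ ". Timeframe", timeframe, ""]
    else lines
   let sectionIndex := if timeframe ≠ "" then sectionIndex + 1 else sectionIndex
   let lines := lines ++ [PySem.Int.toStr sectionIndex ++ ". Pricing"]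
   let lines := lines ++ [if price ≠ "" then price else "Pricing to be confirmed."]
   let lines := lines ++ [""]
   let sectionIndex := sectionIndex + 1
   let lines := lines ++ [PySem.Int.toStr sectionIndex ++ ". Acceptance / Next Steps"]
   let lines := lines ++
    ["Please review the details above and contact us by phone or email " ++
     "to confirm acceptance or discuss any questions. If you have any modifications please feel free to contact us"]
   let lines := lines ++ [""]
   let lines := lines ++ ["Kind regards,"]
   let lines := if business ≠ "" then lines ++ [business] else lines
   PySem.Str.join "\n" lines)
  =
  (let by_ := if business ≠ "" then " to be carried out by " ++ business else ""
   let overviewBody : List String :=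
    ["This proposal outlines the scope of works for " ++ service ++ by_ ++ ". " ++
     "The work will be completed in accordance with standard trade practices and applicable requirements."]
   let scopeBody : List String :=
    if scope ≠ "" then
      (((PySem.Str.splitlines scope).map
          (fun line => PySem.Str.strip (pvLstripDashSpace line))).filter
        (fun item => item ≠ "")).map (fun item => "- " ++ item)
    else
      ["- Details to be confirmed"]
   let sections : List (String × List String) := [("Overview", overviewBody), ("Scope of Work", scopeBody)]
   let sections := if timeframe ≠ "" then sections ++ [("Timeframe", [timeframe])] else sections
   let sections := sections ++ [("Pricing", [if price ≠ "" then price else "Pricing to be confirmed."])]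
   let lines : List String := ["Proposal for: " ++ client, ""]
   let lines := (PySem.List.enumerate sections 1).foldl (fun acc p =>
     (acc ++ [PySem.Int.toStr p.1 ++ ". " ++ p.2.1]) ++ p.2.2 ++ [""]) lines
   let lines := lines ++ [PySem.Int.toStr ((sections.length : Int) + 1) ++ ". Acceptance / Next Steps"]
   let lines := lines ++
    ["Please review the details above and contact us by phone or email " ++
     "to confirm acceptance or discuss any questions. If you have any modifications please feel free to contact us"]
   let lines := lines ++ [""]
   let lines := lines ++ ["Kind regards,"]
   let lines := if business ≠ "" then lines ++ [business] else lines
   PySem.Str.join "\n" lines) := by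
  by_cases ht : timeframe = "" <;>
  by_cases hs : scope = "" <;>
    simp only [ht, hs, ne_eq, not_true_eq_false, if_neg, not_false_eq_true, ite_true,
      PySem.List.foldl_append_ite, List.filter_map, List.map_map,
      PySem.List.enumerate_cons, PySem.List.enumerate_nil, List.cons_append, List.nil_append,
      List.foldl_cons, List.foldl_nil, List.length_cons, List.length_nil,
      List.append_assoc]
  all_goals by_cases hb : business = "" <;> by_cases hp : price = "" <;>
    simp [hb, hp, pv_toStr_one, pv_toStr_two, pv_toStr_three, pv_toStr_four, pv_toStr_five,
      String.append_assoc, String.append_empty, Function.comp_def]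

-- ===== VERDICT (by name: the statement is the Claim_ definition above) =====
theorem build_fallback_proposal_spec : Claim_equal_build_fallback_proposal := by
  intro data _
  unfold Spec_build_fallback_proposal build_fallback_proposal build_fallback_proposal_alt
  exact core _ _ _ _ _ _
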